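-- pv_equiv track=rewrite | github.com/TankManBeta/LeetCode-Python | 面试题_1619_meidum.py | pondSizes
-- ===== SOURCE A (Python) =====
-- from typing import List
--
-- def pondSizes(land: List[List[int]]) -> List[int]:
--     def dfs(i: int, j: int) -> int:
--         res = 1
--         land[i][j] = 1
--         for x in range(i - 1, i + 2):
--             for y in range(j - 1, j + 2):
--                 if 0 <= x < m and 0 <= y < n and land[x][y] == 0:
--                     res += dfs(x, y)
--         return res
--
--     m, n = len(land), len(land[0])
--     return sorted(dfs(i, j) for i in range(m) for j in range(n) if land[i][j] == 0)
-- ===== SOURCE B (Python) =====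
-- from typing import List
--
-- def pondSizes(land: List[List[int]]) -> List[int]:
--     # Iterative flood fill with an explicit stack instead of recursion.
--     # Like the original, mutates land in place (ponds become 1s).
--     m, n = len(land), len(land[0])
--     sizes = []
--     for i in range(m):
--         for j in range(n):
--             if land[i][j] == 0:
--                 count = 0
--                 stack = [(i, j)]
--                 while stack:
--                     x, y = stack.pop()
--                     if 0 <= x < m and 0 <= y < n and land[x][y] == 0:
--                         land[x][y] = 1
--                         count += 1
--                         for dx in (1, 0, -1):
--                             for dy in (1, 0, -1):
--                                 stack.append((x + dx, y + dy))
--                 sizes.append(count)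
--     sizes.sort()
--     return sizes
-- ===== Notes on version B (the rewrite author's own statement) =====
-- stated objective: alternative
-- what changed: The recursive 8-neighbour DFS is replaced by an iterative flood fill with an explicit stack (pop a cell, re-check it is still 0, mark and count it, push its 3x3 neighbourhood), keeping the row-major scan and final sort; both mutate land in place and are compared on the return value.
import Mathlib
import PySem

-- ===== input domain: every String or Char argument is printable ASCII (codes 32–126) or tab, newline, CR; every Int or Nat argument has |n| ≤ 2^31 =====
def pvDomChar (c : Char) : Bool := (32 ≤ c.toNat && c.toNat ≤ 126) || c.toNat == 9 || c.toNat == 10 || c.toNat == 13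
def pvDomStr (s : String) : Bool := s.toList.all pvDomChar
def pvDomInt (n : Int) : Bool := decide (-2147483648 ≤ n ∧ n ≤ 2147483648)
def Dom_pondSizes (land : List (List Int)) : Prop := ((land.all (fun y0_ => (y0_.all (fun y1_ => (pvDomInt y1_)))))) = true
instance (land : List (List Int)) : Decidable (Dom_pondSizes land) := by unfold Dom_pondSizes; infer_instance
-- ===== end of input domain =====

-- B replaces the recursive 8-neighbour DFS by an iterative flood fill with an explicit
-- stack (alternative decomposition, same cost). Both Pythons mutate `land` in place
-- identically; the equivalence proved here is about the RETURN value (the ports are functional).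

-- ===== PORT A =====
-- shared grid helpers: land[x][y] read (used only at in-range indices inside Pre_) and land[x][y] = 1
def pvCell (g : List (List Int)) (x y : Int) : Int := (g.getD x.toNat []).getD y.toNat 0
def pvMark (g : List (List Int)) (x y : Int) : List (List Int) :=
  g.set x.toNat ((g.getD x.toNat []).set y.toNat 1)
-- the 3×3 product range(i-1, i+2) × range(j-1, j+2), unrolled in Python's iteration order
def pvNbrs (i j : Int) : List (Int × Int) :=
  [(i-1, j-1), (i-1, j), (i-1, j+1), (i, j-1), (i, j), (i, j+1), (i+1, j-1), (i+1, j), (i+1, j+1)]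
-- the shared guard `0 <= x < m and 0 <= y < n and land[x][y] == 0`
def pvOpen (m n : Int) (g : List (List Int)) (p : Int × Int) : Bool :=
  decide (0 ≤ p.1) && decide (p.1 < m) && decide (0 ≤ p.2) && decide (p.2 < n) && (pvCell g p.1 p.2 == 0)
-- number of zero cells: the fuel measure (each recursive call / counted pop marks one zero)
def pvZ : List (List Int) → Nat
  | [] => 0
  | r :: t => r.count 0 + pvZ t

mutual
-- dfs(i, j): mark, then scan the 3×3 neighbourhood recursing into still-zero in-bounds cells
def dfsA (fuel : Nat) (m n : Int) (g : List (List Int)) (i j : Int) : Int × List (List Int) :=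
  match fuel with
  | 0 => (1, pvMark g i j)   -- fuel guard only; unreachable for fuel > pvZ g
  | f + 1 => goA f m n (pvMark g i j) (pvNbrs i j) 1
termination_by (fuel, 0)
-- the two nested `for` loops of dfs, over the remaining neighbour list, threading (res, land)
def goA (f : Nat) (m n : Int) (g : List (List Int)) (ps : List (Int × Int)) (res : Int) :
    Int × List (List Int) :=
  match ps with
  | [] => (res, g)
  | p :: ps' =>
    if pvOpen m n g p then
      let r := dfsA f m n g p.1 p.2
      goA f m n r.2 ps' (res + r.1)
    else goA f m n g ps' res
termination_by (f, ps.length + 1)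
end

-- row-major scan of all cells
def pvCells (m n : Int) : List (Int × Int) :=
  (PySem.List.pyRange 0 m 1).flatMap (fun i => (PySem.List.pyRange 0 n 1).map (fun j => (i, j)))

-- the generator `dfs(i, j) for i in range(m) for j in range(n) if land[i][j] == 0`, threading land
def outerA (m n : Int) (g : List (List Int)) : List (Int × Int) → List Int
  | [] => []
  | p :: cs =>
    if pvCell g p.1 p.2 == 0 then
      let r := dfsA (pvZ g + 1) m n g p.1 p.2
      r.1 :: outerA m n r.2 cs
    else outerA m n g cs

def pondSizes (land : List (List Int)) : List Int :=
  let m : Int := land.length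
  let n : Int := (land.headD []).length
  PySem.List.sorted (outerA m n land (pvCells m n)) (fun x => x) false

-- ===== PORT B =====
-- the `while stack` loop: pop, re-check the popped cell, mark+count it and push its 3×3
-- neighbourhood (Source B pushes them reversed onto the end; head of this list = top of stack,
-- so pops come out in pvNbrs order)
def runB (fuel : Nat) (m n : Int) (g : List (List Int)) (stack : List (Int × Int)) (c : Int) :
    Int × List (List Int) :=
  match fuel, stack with
  | _, [] => (c, g)
  | 0, _ :: _ => (c, g)   -- fuel guard only; unreachable for fuel > 10 * pvZ g
  | f + 1, p :: rest =>
    if pvOpen m n g p then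
      runB f m n (pvMark g p.1 p.2) (pvNbrs p.1 p.2 ++ rest) (c + 1)
    else runB f m n g rest c

-- the two nested `for` loops of Source B over all cells, threading land and collecting sizes
def outerB (m n : Int) (g : List (List Int)) : List (Int × Int) → List Int
  | [] => []
  | p :: cs =>
    if pvCell g p.1 p.2 == 0 then
      let r := runB (10 * pvZ g + 1) m n g [p] 0
      r.1 :: outerB m n r.2 cs
    else outerB m n g cs

def pondSizes_alt (land : List (List Int)) : List Int :=
  let m : Int := land.length
  let n : Int := (land.headD []).length
  PySem.List.sorted (outerB m n land (pvCells m n)) (fun x => x) false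

-- ===== PRECONDITION & SPEC =====
-- Pre_ excludes exactly the inputs where A raises: the empty grid (land[0] → IndexError) and
-- grids with a row shorter than the first row (the full scan reads land[i][j] for every j <
-- len(land[0]), so any such row raises IndexError).
def Pre_pondSizes (land : List (List Int)) : Prop :=
  land ≠ [] ∧ ∀ row ∈ land, (land.headD []).length ≤ row.length
instance (land : List (List Int)) : Decidable (Pre_pondSizes land) := by
  unfold Pre_pondSizes; infer_instance
def pvWitness_pondSizes : List (List Int) := [[0, 1], [1, 0]]

def Spec_pondSizes (land : List (List Int)) (out : List Int) : Prop := out = pondSizes_alt land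
instance (land : List (List Int)) (out : List Int) : Decidable (Spec_pondSizes land out) := by
  unfold Spec_pondSizes; infer_instance

-- ===== CLAIM (what is proved, stated in full; the proofs are below) =====
def Claim_equal_pondSizes : Prop :=
  ∀ (land : List (List Int)), Dom_pondSizes land → Pre_pondSizes land →
    Spec_pondSizes land (pondSizes land)

-- ===== LEMMAS AND PROOFS =====

-- a grid of m rows, each of length ≥ n (preserved by marking)
def pvShape (m n : Int) (g : List (List Int)) : Prop :=
  (g.length : Int) = m ∧ ∀ row ∈ g, n ≤ (row.length : Int)

theorem pvShape_mark (m n x y : Int) (g : List (List Int)) (hs : pvShape m n g)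
    (hx0 : 0 ≤ x) (hxm : x < m) : pvShape m n (pvMark g x y) := by
  obtain ⟨h1, h2⟩ := hs
  have hk : x.toNat < g.length := by
    have hx : (x.toNat : Int) = x := Int.toNat_of_nonneg hx0
    omega
  refine ⟨by simpa [pvMark] using h1, ?_⟩
  intro row hr
  rcases List.mem_or_eq_of_mem_set hr with h | h
  · exact h2 row h
  · subst h
    rw [List.length_set, List.getD_eq_getElem _ _ hk]
    exact h2 _ (List.getElem_mem hk)

theorem pvCount_set_zero (r : List Int) (j : Nat) (hj : j < r.length) (h0 : r[j] = 0) :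
    (r.set j 1).count 0 + 1 = r.count 0 := by
  induction r generalizing j with
  | nil => simp at hj
  | cons a t ih =>
    cases j with
    | zero =>
      simp only [List.getElem_cons_zero] at h0
      subst h0
      simp
    | succ j =>
      simp only [List.getElem_cons_succ] at h0
      simp only [List.set_cons_succ, List.count_cons]
      have := ih j (by simpa using hj) h0
      omega

theorem pvZ_set : ∀ (g : List (List Int)) (k j : Nat) (hk : k < g.length)
    (hj : j < (g[k]'hk).length), (g[k]'hk)[j]'hj = 0 →
    pvZ (g.set k ((g[k]'hk).set j 1)) + 1 = pvZ g := by
  intro g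
  induction g with
  | nil => intro k j hk; simp at hk
  | cons r t ih =>
    intro k j hk hj h0
    cases k with
    | zero =>
      simp only [List.getElem_cons_zero] at hj h0
      simp only [List.getElem_cons_zero, List.set_cons_zero, pvZ]
      have := pvCount_set_zero r j hj h0
      omega
    | succ k =>
      simp only [List.getElem_cons_succ] at hj h0
      simp only [List.getElem_cons_succ, List.set_cons_succ, pvZ]
      have := ih k j (by simpa using hk) hj h0
      omega

theorem pvZ_mark (m n x y : Int) (g : List (List Int)) (hs : pvShape m n g)
    (h : pvOpen m n g (x, y) = true) : pvZ (pvMark g x y) + 1 = pvZ g := by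
  obtain ⟨h1, h2⟩ := hs
  simp only [pvOpen, Bool.and_eq_true, decide_eq_true_eq, beq_iff_eq] at h
  obtain ⟨⟨⟨⟨hx0, hxm⟩, hy0⟩, hyn⟩, hc⟩ := h
  have hxN : (x.toNat : Int) = x := Int.toNat_of_nonneg hx0
  have hyN : (y.toNat : Int) = y := Int.toNat_of_nonneg hy0
  have hk : x.toNat < g.length := by omega
  have hrow : n ≤ ((g[x.toNat]'hk).length : Int) := h2 _ (List.getElem_mem hk)
  have hj : y.toNat < (g[x.toNat]'hk).length := by omega
  have e1 : g.getD x.toNat [] = g[x.toNat]'hk := List.getD_eq_getElem g [] hk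
  have hc' : (g[x.toNat]'hk)[y.toNat]'hj = 0 := by
    have e2 : (g[x.toNat]'hk).getD y.toNat 0 = (g[x.toNat]'hk)[y.toNat]'hj :=
      List.getD_eq_getElem _ 0 hj
    rw [pvCell, e1, e2] at hc
    exact hc
  have := pvZ_set g x.toNat y.toNat hk hj hc'
  rw [pvMark, e1]
  exact this

theorem pvGo_append (f : Nat) (m n : Int) :
    ∀ (xs ys : List (Int × Int)) (g : List (List Int)) (r : Int),
      goA f m n g (xs ++ ys) r = goA f m n (goA f m n g xs r).2 ys (goA f m n g xs r).1 := by
  intro xs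
  induction xs with
  | nil => intro ys g r; simp [goA]
  | cons p xs ih =>
    intro ys g r
    by_cases h : pvOpen m n g p = true
    · simp only [List.cons_append, goA, if_pos h]
      exact ih ys _ _
    · simp only [List.cons_append, goA, if_neg h]
      exact ih ys _ _

theorem pvGo_offset (f : Nat) (m n : Int) :
    ∀ (s : List (Int × Int)) (g : List (List Int)) (r : Int),
      goA f m n g s r = (r + (goA f m n g s 0).1, (goA f m n g s 0).2) := by
  intro s
  induction s with
  | nil => intro g r; simp [goA]
  | cons p ps ih =>
    intro g r
    by_cases h : pvOpen m n g p = true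
    · simp only [goA, if_pos h]
      rw [ih _ (r + (dfsA f m n g p.1 p.2).1), ih _ (0 + (dfsA f m n g p.1 p.2).1)]
      simp only [Prod.mk.injEq]
      exact ⟨by ring, trivial⟩
    · simp only [goA, if_neg h]
      exact ih _ _

theorem pvAux (m n : Int) :
    ∀ (N : Nat) (s : List (Int × Int)) (g : List (List Int)) (f f' : Nat) (r : Int),
      pvShape m n g → pvZ g ≤ N → pvZ g ≤ f → pvZ g ≤ f' →
      goA f m n g s r = goA f' m n g s r ∧
      pvZ (goA f m n g s r).2 ≤ pvZ g ∧ pvShape m n (goA f m n g s r).2 := by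
  intro N
  induction N using Nat.strong_induction_on with
  | _ N IHN =>
  intro s
  induction s with
  | nil =>
    intro g f f' r hs hN hf hf'
    exact ⟨by simp [goA], by simp [goA], by simpa [goA] using hs⟩
  | cons p ps IHs =>
    intro g f f' r hs hN hf hf'
    by_cases h : pvOpen m n g p = true
    · have hP : pvOpen m n g (p.1, p.2) = true := by simpa using h
      have hzm : pvZ (pvMark g p.1 p.2) + 1 = pvZ g := pvZ_mark m n p.1 p.2 g hs hP
      have hb := h
      simp only [pvOpen, Bool.and_eq_true, decide_eq_true_eq, beq_iff_eq] at hb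
      obtain ⟨⟨⟨⟨hx0, hxm⟩, hy0⟩, hyn⟩, hc⟩ := hb
      obtain ⟨fc, rfl⟩ : ∃ fc, f = fc + 1 := ⟨f - 1, by omega⟩
      obtain ⟨fc', rfl⟩ : ∃ fc', f' = fc' + 1 := ⟨f' - 1, by omega⟩
      have hs1 : pvShape m n (pvMark g p.1 p.2) := pvShape_mark m n p.1 p.2 g hs hx0 hxm
      obtain ⟨hcEq, hcZ, hcSh⟩ :=
        IHN (pvZ (pvMark g p.1 p.2)) (by omega) (pvNbrs p.1 p.2) (pvMark g p.1 p.2)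
          fc fc' 1 hs1 le_rfl (by omega) (by omega)
      have hdfs : dfsA (fc + 1) m n g p.1 p.2 = dfsA (fc' + 1) m n g p.1 p.2 := by
        simp only [dfsA]
        exact hcEq
      have hg2Z : pvZ (dfsA (fc + 1) m n g p.1 p.2).2 + 1 ≤ pvZ g := by
        simp only [dfsA]
        omega
      have hg2Sh : pvShape m n (dfsA (fc + 1) m n g p.1 p.2).2 := by
        simp only [dfsA]
        exact hcSh
      obtain ⟨htEq, htZ, htSh⟩ :=
        IHs (dfsA (fc + 1) m n g p.1 p.2).2 (fc + 1) (fc' + 1)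
          (r + (dfsA (fc + 1) m n g p.1 p.2).1) hg2Sh (by omega) (by omega) (by omega)
      refine ⟨?_, ?_, ?_⟩
      · simp only [goA, if_pos h]
        rw [← hdfs]
        exact htEq
      · simp only [goA, if_pos h]
        omega
      · simp only [goA, if_pos h]
        exact htSh
    · simp only [goA, if_neg h]
      exact IHs g f f' r hs hN hf hf'

theorem pvDfs_all (m n : Int) (g : List (List Int)) (i j : Int) (f : Nat)
    (hs : pvShape m n g) (h : pvOpen m n g (i, j) = true) (hf : pvZ g ≤ f) :
    (∀ f', pvZ g ≤ f' → dfsA f m n g i j = dfsA f' m n g i j) ∧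
    pvZ (dfsA f m n g i j).2 + 1 ≤ pvZ g ∧ pvShape m n (dfsA f m n g i j).2 := by
  have hzm : pvZ (pvMark g i j) + 1 = pvZ g := pvZ_mark m n i j g hs h
  have hb := h
  simp only [pvOpen, Bool.and_eq_true, decide_eq_true_eq, beq_iff_eq] at hb
  obtain ⟨⟨⟨⟨hx0, hxm⟩, hy0⟩, hyn⟩, hc⟩ := hb
  have hs1 : pvShape m n (pvMark g i j) := pvShape_mark m n i j g hs hx0 hxm
  obtain ⟨fc, rfl⟩ : ∃ fc, f = fc + 1 := ⟨f - 1, by omega⟩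
  have base := pvAux m n (pvZ (pvMark g i j)) (pvNbrs i j) (pvMark g i j)
  refine ⟨?_, ?_, ?_⟩
  · intro f' hf'
    obtain ⟨fc', rfl⟩ : ∃ fc', f' = fc' + 1 := ⟨f' - 1, by omega⟩
    simp only [dfsA]
    exact (base fc fc' 1 hs1 le_rfl (by omega) (by omega)).1
  · have := (base fc fc 1 hs1 le_rfl (by omega) (by omega)).2.1
    simp only [dfsA]
    omega
  · have := (base fc fc 1 hs1 le_rfl (by omega) (by omega)).2.2
    simp only [dfsA]
    exact this

theorem pvSim (m n : Int) :
    ∀ (F : Nat) (s : List (Int × Int)) (g : List (List Int)) (c : Int) (fA : Nat),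
      pvShape m n g → s.length + 10 * pvZ g ≤ F → pvZ g ≤ fA →
      runB F m n g s c = (c + (goA fA m n g s 0).1, (goA fA m n g s 0).2) := by
  intro F
  induction F with
  | zero =>
    intro s g c fA hs hF hfA
    have hnil : s = [] := List.eq_nil_of_length_eq_zero (by omega)
    subst hnil
    simp [runB, goA]
  | succ F ih =>
    intro s g c fA hs hF hfA
    match s with
    | [] => simp [runB, goA]
    | p :: rest =>
      by_cases h : pvOpen m n g p = true
      · -- marked pop
        have hP : pvOpen m n g (p.1, p.2) = true := by simpa using h
        have hzm : pvZ (pvMark g p.1 p.2) + 1 = pvZ g := pvZ_mark m n p.1 p.2 g hs hP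
        have hb := h
        simp only [pvOpen, Bool.and_eq_true, decide_eq_true_eq, beq_iff_eq] at hb
        obtain ⟨⟨⟨⟨hx0, hxm⟩, hy0⟩, hyn⟩, hc⟩ := hb
        have hs1 : pvShape m n (pvMark g p.1 p.2) := pvShape_mark m n p.1 p.2 g hs hx0 hxm
        have hlen : (p :: rest).length = rest.length + 1 := by simp
        have hnlen : (pvNbrs p.1 p.2 ++ rest).length = rest.length + 9 := by simp [pvNbrs]
        -- LHS: pop p, mark it, push its neighbourhood
        have hL := ih (pvNbrs p.1 p.2 ++ rest) (pvMark g p.1 p.2) (c + 1) (pvZ (pvMark g p.1 p.2))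
          hs1 (by omega) le_rfl
        -- child fill on the marked grid, at fuel pvZ g1
        set g1 := pvMark g p.1 p.2 with hg1
        obtain ⟨fc, rfl⟩ : ∃ fc, fA = fc + 1 := ⟨fA - 1, by omega⟩
        obtain ⟨hcEq, hcZ, hcSh⟩ :=
          pvAux m n (pvZ g1) (pvNbrs p.1 p.2) g1 fc (pvZ g1) 1 hs1 le_rfl (by omega) le_rfl
        -- split the A-side expression: goA over nbrs ++ rest
        rw [pvGo_append (pvZ g1) m n (pvNbrs p.1 p.2) rest g1 0] at hL
        set q := goA (pvZ g1) m n g1 (pvNbrs p.1 p.2) 0 with hq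
        obtain ⟨-, hqZ, hqSh⟩ :=
          pvAux m n (pvZ g1) (pvNbrs p.1 p.2) g1 (pvZ g1) (pvZ g1) 0 hs1 le_rfl le_rfl le_rfl
        rw [← hq] at hqZ hqSh
        obtain ⟨hrf, -, -⟩ :=
          pvAux m n (pvZ q.2) rest q.2 (pvZ g1) (fc + 1) 0 hqSh le_rfl (by omega) (by omega)
        have hdfs : dfsA (fc + 1) m n g p.1 p.2 = (1 + q.1, q.2) := by
          simp only [dfsA]
          rw [(pvAux m n (pvZ g1) (pvNbrs p.1 p.2) g1 fc (pvZ g1) 1 hs1 le_rfl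
            (by omega) le_rfl).1]
          rw [pvGo_offset (pvZ g1) m n (pvNbrs p.1 p.2) g1 1, ← hq]
        simp only [runB, if_pos h]
        rw [hL]
        simp only [goA, if_pos h]
        rw [hdfs]
        rw [pvGo_offset (pvZ g1) m n rest q.2 q.1]
        rw [pvGo_offset (fc + 1) m n rest q.2 (0 + (1 + q.1))]
        rw [← hrf]
        simp only [Prod.mk.injEq]
        exact ⟨by ring, trivial⟩
      · simp only [runB, goA, if_neg h]
        exact ih rest g c fA hs (by simp at hF; omega) hfA

theorem pvFill (m n : Int) (g : List (List Int)) (i j : Int) (hs : pvShape m n g)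
    (h : pvOpen m n g (i, j) = true) :
    runB (10 * pvZ g + 1) m n g [(i, j)] 0 = dfsA (pvZ g + 1) m n g i j := by
  have hzm : pvZ (pvMark g i j) + 1 = pvZ g := pvZ_mark m n i j g hs h
  have hsim := pvSim m n (10 * pvZ g + 1) [(i, j)] g 0 (pvZ g) hs (by simp; omega) le_rfl
  have hre := (pvDfs_all m n g i j (pvZ g) hs h le_rfl).1 (pvZ g + 1) (by omega)
  rw [hsim]
  simp only [goA, if_pos h]
  rw [hre]
  simp

theorem pvCells_inB (m n : Int) (p : Int × Int) (hp : p ∈ pvCells m n) :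
    0 ≤ p.1 ∧ p.1 < m ∧ 0 ≤ p.2 ∧ p.2 < n := by
  simp only [pvCells, List.mem_flatMap, List.mem_map] at hp
  obtain ⟨i, hi, j, hj, rfl⟩ := hp
  rw [PySem.List.mem_pyRange_one] at hi hj
  exact ⟨hi.1, hi.2, hj.1, hj.2⟩

theorem pvOuter_eq (m n : Int) :
    ∀ (cs : List (Int × Int)) (g : List (List Int)), pvShape m n g →
      (∀ p ∈ cs, 0 ≤ p.1 ∧ p.1 < m ∧ 0 ≤ p.2 ∧ p.2 < n) →
      outerA m n g cs = outerB m n g cs := by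
  intro cs
  induction cs with
  | nil => intro g hs hcs; rfl
  | cons p cs ih =>
    intro g hs hcs
    have hpB := hcs p (by simp)
    by_cases h0 : (pvCell g p.1 p.2 == 0) = true
    · have hOpen : pvOpen m n g p = true := by
        simp only [pvOpen, Bool.and_eq_true, decide_eq_true_eq, beq_iff_eq] at h0 ⊢
        exact ⟨⟨⟨⟨hpB.1, hpB.2.1⟩, hpB.2.2.1⟩, hpB.2.2.2⟩, h0⟩
      have hOpen' : pvOpen m n g (p.1, p.2) = true := by simpa using hOpen
      have hfill := pvFill m n g p.1 p.2 hs hOpen'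
      have hd := pvDfs_all m n g p.1 p.2 (pvZ g + 1) hs hOpen' (by omega)
      rw [show ((p.1, p.2) : Int × Int) = p from rfl] at hfill
      simp only [outerA, outerB, if_pos h0]
      rw [hfill, ih (dfsA (pvZ g + 1) m n g p.1 p.2).2 hd.2.2
        (fun q hq => hcs q (by simp [hq]))]
    · simp only [outerA, outerB, if_neg h0]
      exact ih g hs (fun q hq => hcs q (by simp [hq]))

-- ===== VERDICT (by name: the statement is the Claim_ definition above) =====
theorem pondSizes_spec : Claim_equal_pondSizes := by
  intro land _ hPre
  obtain ⟨hne, hrows⟩ := hPre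
  have hsh : pvShape ((land.length : Int)) (((land.headD []).length : Int)) land := by
    refine ⟨rfl, ?_⟩
    intro row hr
    exact_mod_cast hrows row hr
  unfold Spec_pondSizes
  simp only [pondSizes, pondSizes_alt]
  rw [pvOuter_eq _ _ (pvCells _ _) land hsh
    (fun q hq => pvCells_inB _ _ q hq)]
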